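-- pv_equiv track=rewrite | github.com/ayshathlubna/home_fuinishing_hf_render | home_project/user_app/views.py | group_sub_items
-- ===== SOURCE A (Python) =====
-- def group_sub_items(items, group_size):
--     items = list(items)
--     if not items:
--         return []
--
--     num_groups = (len(items) + group_size - 1) // group_size
--
--     # Extend list to make total items = num_groups * group_size
--     extended_items = items.copy()
--     while len(extended_items) < num_groups * group_size:
--         extended_items += items  # Repeat if needed
--
--     extended_items = extended_items[:num_groups * group_size]
--
--     # Split into chunks of group_size
--     return [extended_items[i:i + group_size] for i in range(0, len(extended_items), group_size)]
-- ===== SOURCE B (Python) =====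
-- def group_sub_items(items, group_size):
--     items = list(items)
--     if not items:
--         return []
--     num_groups = (len(items) + group_size - 1) // group_size
--     n = len(items)
--     return [[items[(g * group_size + j) % n] for j in range(group_size)]
--             for g in range(num_groups)]
-- ===== Notes on version B (the rewrite author's own statement) =====
-- stated objective: simpler
-- what changed: Replaces the grow-by-repeated-concatenation buffer, truncation and re-chunking slice pass with direct construction of each group by modular indexing into the original list.
-- intended difference: On a single-item list with negative group_size, A returns [] (its descending-step chunking range is empty) while B returns [[]], one empty group as dictated by A's own num_groups formula; a negative group size is an unspecified corner and B's value follows the computed group count consistently. — e.g. on group_sub_items([5], -1): A returns [], B returns [[]]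
import Mathlib
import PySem

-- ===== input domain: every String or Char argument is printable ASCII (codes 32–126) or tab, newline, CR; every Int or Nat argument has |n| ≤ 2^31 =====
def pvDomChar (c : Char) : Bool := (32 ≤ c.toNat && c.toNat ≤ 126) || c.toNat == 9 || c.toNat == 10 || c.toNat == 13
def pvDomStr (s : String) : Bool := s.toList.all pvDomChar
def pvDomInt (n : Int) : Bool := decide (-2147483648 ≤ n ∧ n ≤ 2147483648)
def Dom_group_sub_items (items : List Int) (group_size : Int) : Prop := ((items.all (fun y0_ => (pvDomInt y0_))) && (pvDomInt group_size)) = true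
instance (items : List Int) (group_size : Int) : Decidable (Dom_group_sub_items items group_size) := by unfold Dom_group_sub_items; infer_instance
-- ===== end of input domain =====

-- B replaces A's extend-buffer/truncate/re-chunk passes by building each group directly
-- with modular indexing; equal on Pre_ outside D_ (single-item list with negative group_size).

-- ===== PORT A =====
-- A's while loop: 'while len(extended) < target: extended += items'.
-- The 'items ≠ []' conjunct is a totality guard only: A reaches this loop only
-- with nonempty items (the empty case returned [] earlier).
def pvExtend (items : List Int) (ext : List Int) (target : Int) : List Int :=
  if h : (ext.length : Int) < target ∧ items ≠ [] then
    pvExtend items (ext ++ items) target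
  else ext
termination_by (target - (ext.length : Int)).toNat
decreasing_by
  have h1 : 1 ≤ items.length := List.length_pos_iff.mpr h.2
  simp only [List.length_append]
  omega

def group_sub_items (items : List Int) (group_size : Int) : List (List Int) :=
  if items = [] then []
  else
    let num_groups := PySem.Int.floordiv ((items.length : Int) + group_size - 1) group_size
    let extended0 := pvExtend items items (num_groups * group_size)
    let extended := PySem.List.slice extended0 none (some (num_groups * group_size))
    (PySem.List.pyRange 0 (extended.length : Int) group_size).map
      (fun i => PySem.List.slice extended (some i) (some (i + group_size)))

-- ===== PORT B =====
-- B: the index (g*group_size + j) % n is always in range for nonempty items and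
-- positive modulus, so Python's items[...] never raises; pyGetD's default is unreachable.
def group_sub_items_alt (items : List Int) (group_size : Int) : List (List Int) :=
  if items = [] then []
  else
    let num_groups := PySem.Int.floordiv ((items.length : Int) + group_size - 1) group_size
    let n : Int := (items.length : Int)
    (PySem.List.pyRange 0 num_groups 1).map (fun g =>
      (PySem.List.pyRange 0 group_size 1).map (fun j =>
        PySem.List.pyGetD items (PySem.Int.mod (g * group_size + j) n) 0))

-- ===== PRECONDITION & SPEC =====
-- Pre_ excludes exactly the inputs where A raises ZeroDivisionError: nonempty items with
-- group_size = 0 (B raises there too); for empty items A returns [] before dividing.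
def Pre_group_sub_items (items : List Int) (group_size : Int) : Prop :=
  items = [] ∨ group_size ≠ 0
instance (items : List Int) (group_size : Int) : Decidable (Pre_group_sub_items items group_size) := by unfold Pre_group_sub_items; infer_instance

def pvWitness_group_sub_items : List Int × Int := ([1, 2, 3], 2)

-- On a single-item list with negative group_size, A returns [] (its descending-step chunking
-- range is empty) while B returns [[]], one empty group as dictated by A's own num_groups
-- formula; a negative group size is an unspecified corner and B's value follows the computed
-- group count consistently.
def D_group_sub_items (items : List Int) (group_size : Int) : Prop :=
  group_size < 0 ∧ items ≠ [] ∧ items.tail = []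
instance (items : List Int) (group_size : Int) : Decidable (D_group_sub_items items group_size) := by unfold D_group_sub_items; infer_instance

def Spec_group_sub_items (items : List Int) (group_size : Int) (out : List (List Int)) : Prop :=
  ¬ D_group_sub_items items group_size → out = group_sub_items_alt items group_size
instance (items : List Int) (group_size : Int) (out : List (List Int)) : Decidable (Spec_group_sub_items items group_size out) := by unfold Spec_group_sub_items; infer_instance

def pvDiffWitness_group_sub_items : List Int × Int := ([5], -1)
def pvDiffWitnessOut_group_sub_items : (List (List Int)) × (List (List Int)) := ([], [[]])

-- ===== CLAIM (what is proved, stated in full; the proofs are below) =====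
def Claim_unchanged_group_sub_items : Prop := ∀ (items : List Int) (group_size : Int), Dom_group_sub_items items group_size → Pre_group_sub_items items group_size → Spec_group_sub_items items group_size (group_sub_items items group_size)
def Claim_changed_group_sub_items : Prop := Dom_group_sub_items (pvDiffWitness_group_sub_items.1) (pvDiffWitness_group_sub_items.2) ∧ Pre_group_sub_items (pvDiffWitness_group_sub_items.1) (pvDiffWitness_group_sub_items.2) ∧ D_group_sub_items (pvDiffWitness_group_sub_items.1) (pvDiffWitness_group_sub_items.2) ∧ group_sub_items (pvDiffWitness_group_sub_items.1) (pvDiffWitness_group_sub_items.2) = pvDiffWitnessOut_group_sub_items.1 ∧ group_sub_items_alt (pvDiffWitness_group_sub_items.1) (pvDiffWitness_group_sub_items.2) = pvDiffWitnessOut_group_sub_items.2 ∧ pvDiffWitnessOut_group_sub_items.1 ≠ pvDiffWitnessOut_group_sub_items.2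
def Claim_exact_group_sub_items : Prop := ∀ (items : List Int) (group_size : Int), Dom_group_sub_items items group_size → Pre_group_sub_items items group_size → D_group_sub_items items group_size → group_sub_items items group_size ≠ group_sub_items_alt items group_size

-- ===== LEMMAS AND PROOFS =====

-- range(0, b, step) is empty for a negative step and nonnegative stop
theorem pyRange_zero_nonneg_neg (b s : Int) (hs : s < 0) (hb : 0 ≤ b) :
    PySem.List.pyRange 0 b s = [] := by
  simp only [PySem.List.pyRange]
  rw [if_neg (by omega), if_neg (by omega), if_neg (by omega)]
  simp

-- the while loop preserves periodicity and reaches the target length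
theorem pvExtend_spec (items : List Int) (hne : items ≠ []) (ext : List Int) (t : Int) :
    items.length ∣ ext.length →
    (∀ i, i < ext.length → ext[i]? = items[i % items.length]?) →
    t ≤ ((pvExtend items ext t).length : Int) ∧
      (∀ i, i < (pvExtend items ext t).length →
        (pvExtend items ext t)[i]? = items[i % items.length]?) := by
  fun_induction pvExtend items ext t with
  | case1 ext h ih =>
    intro hdvd hper
    refine ih ?_ ?_
    · simp only [List.length_append]
      exact Dvd.dvd.add hdvd dvd_rfl
    · intro i hi
      simp only [List.length_append] at hi
      by_cases hlt : i < ext.length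
      · rw [List.getElem?_append_left hlt]; exact hper i hlt
      · rw [List.getElem?_append_right (by omega)]
        obtain ⟨c, hc⟩ := hdvd
        have h1 : 1 ≤ items.length := List.length_pos_iff.mpr hne
        have hsub : i - ext.length < items.length := by omega
        have hmod : i % items.length = (i - ext.length) % items.length := by
          conv_lhs => rw [show i = (i - ext.length) + items.length * c by omega]
          exact Nat.add_mul_mod_self_left _ _ _
        rw [hmod, Nat.mod_eq_of_lt hsub]
  | case2 ext h =>
    intro _ hper
    constructor
    · by_contra hc
      exact h ⟨by omega, hne⟩
    · exact hper

-- a full chunk of a list that is items repeated, as a map over range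
theorem chunk_eq_map (E items : List Int) (n s a : Nat) (hn : n = items.length)
    (hpos : 0 < n)
    (hE : ∀ i, i < E.length → E[i]? = items[i % n]?)
    (hlen : a + s ≤ E.length) :
    (E.drop a).take s = (List.range s).map (fun j => items.getD ((a + j) % n) 0) := by
  apply List.ext_getElem?
  intro j
  by_cases hj : j < s
  · have hEj : a + j < E.length := by omega
    have hm : (a + j) % n < items.length := by rw [← hn]; exact Nat.mod_lt _ hpos
    rw [List.getElem?_take_of_lt hj, List.getElem?_drop, hE _ hEj,
        List.getElem?_map, List.getElem?_range hj]
    simp only [Option.map_some]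
    rw [List.getElem?_eq_getElem hm, List.getD_eq_getElem _ _ hm]
  · have hlen1 : (List.take s (List.drop a E)).length ≤ j := by
      simp only [List.length_take, List.length_drop]; omega
    have hlen2 : ((List.range s).map (fun j => items.getD ((a + j) % n) 0)).length ≤ j := by
      simp only [List.length_map, List.length_range]; omega
    rw [List.getElem?_eq_none hlen1, List.getElem?_eq_none hlen2]

-- pyRange 0 (Q*s) s enumerates the chunk starts 0, s, 2s, …
theorem pyRange_mul_pos (Q s : Nat) (hs : 1 ≤ s) (hQ : 1 ≤ Q) :
    PySem.List.pyRange 0 ((Q * s : Nat) : Int) (s : Int)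
      = (List.range Q).map (fun k : Nat => ((s : Int)) * (k : Int)) := by
  rw [PySem.List.pyRange_of_pos _ _ (by exact_mod_cast hs)]
  rw [if_pos (by exact_mod_cast Nat.mul_pos (by omega) (by omega))]
  have h1 : (((Q * s : Nat) : Int) - 0 + (s : Int) - 1) = ((Q * s + s - 1 : Nat) : Int) := by
    push_cast; omega
  have h2 : Q * s + s - 1 = s * Q + (s - 1) := by rw [Nat.mul_comm]; omega
  have h3 : (((Q * s : Nat) : Int) - 0 + (s : Int) - 1) / (s : Int) = ((Q : Nat) : Int) := by
    rw [h1, h2, ← Int.natCast_div, Nat.mul_add_div (by omega), Nat.div_eq_of_lt (by omega),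
      Nat.add_zero]
  rw [h3, Int.toNat_natCast]
  simp only [zero_add]

-- ===== VERDICT (by name: the statement is the Claim_ definition above) =====
theorem group_sub_items_spec : Claim_unchanged_group_sub_items := by
  intro items gs _ hpre
  unfold Spec_group_sub_items
  intro hnd
  by_cases hemp : items = []
  · subst hemp; simp [group_sub_items, group_sub_items_alt]
  have hgs0 : gs ≠ 0 := hpre.resolve_left hemp
  have hn1 : 1 ≤ items.length := List.length_pos_iff.mpr hemp
  simp only [group_sub_items, group_sub_items_alt, if_neg hemp]
  rcases lt_or_gt_of_ne hgs0 with hneg | hpos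
  · -- gs < 0; ¬D gives items.length ≠ 1, so 2 ≤ items.length; both sides are []
    have hn2 : 2 ≤ items.length := by
      match items, hemp with
      | [x], _ => exact absurd ⟨hneg, List.cons_ne_nil x [], rfl⟩ hnd
      | x :: y :: rest, _ => simp
    rw [pyRange_zero_nonneg_neg _ _ hneg (Int.natCast_nonneg _)]
    have hq : PySem.Int.floordiv ((items.length : Int) + gs - 1) gs ≤ 0 := by
      rw [← PySem.Int.floordiv_neg_neg]
      by_contra hc
      have h1 := (PySem.Int.le_floordiv_iff_mul_le
        (a := -((items.length : Int) + gs - 1)) (b := -gs) (q := 1) (by omega)).mp (by omega)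
      omega
    rw [PySem.List.pyRange_one_eq_nil hq]
    simp
  · -- gs > 0, the main case
    obtain ⟨s, rfl⟩ : ∃ s : Nat, gs = (s : Int) :=
      ⟨gs.toNat, (Int.toNat_of_nonneg (by omega)).symm⟩
    have hs1 : 1 ≤ s := by exact_mod_cast hpos
    have hcast : ((items.length : Int) + (s : Int) - 1) = ((items.length + s - 1 : Nat) : Int) := by
      omega
    have hfd : PySem.Int.floordiv ((items.length : Int) + (s : Int) - 1) (s : Int)
        = (((items.length + s - 1) / s : Nat) : Int) := by
      rw [hcast, PySem.Int.floordiv_natCast]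
    set Q := (items.length + s - 1) / s with hQdef
    have hdivmod := Nat.div_add_mod (items.length + s - 1) s
    rw [← hQdef] at hdivmod
    have hmodlt : (items.length + s - 1) % s < s := Nat.mod_lt _ (by omega)
    have hcomm : Q * s = s * Q := Nat.mul_comm _ _
    have hNn : items.length ≤ Q * s := by omega
    have hQ1 : 1 ≤ Q := by
      rcases Nat.eq_zero_or_pos Q with h0 | h
      · rw [h0, Nat.mul_zero] at hdivmod; omega
      · exact h
    have hNint : ((Q : Nat) : Int) * (s : Int) = ((Q * s : Nat) : Int) := by push_cast; ring
    have hper0 : ∀ i, i < items.length → items[i]? = items[i % items.length]? := by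
      intro i hi; rw [Nat.mod_eq_of_lt hi]
    obtain ⟨hRlen, hRper⟩ :=
      pvExtend_spec items hemp items (((Q : Nat) : Int) * (s : Int)) (dvd_refl _) hper0
    set R := pvExtend items items (((Q : Nat) : Int) * (s : Int)) with hRdef
    have hRlen' : Q * s ≤ R.length := by
      rw [hNint] at hRlen; exact_mod_cast hRlen
    have hsl : PySem.List.slice R none (some (((Q : Nat) : Int) * (s : Int)))
        = R.take (Q * s) := by
      rw [hNint, PySem.List.slice_to_natCast]
    rw [hfd, hsl]
    have hElen : ((R.take (Q * s)).length : Int) = ((Q * s : Nat) : Int) := by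
      simp only [List.length_take]; congr 1; omega
    have hEper : ∀ i, i < (R.take (Q * s)).length →
        (R.take (Q * s))[i]? = items[i % items.length]? := by
      intro i hi
      simp only [List.length_take] at hi
      rw [List.getElem?_take_of_lt (by omega)]
      exact hRper i (by omega)
    rw [hElen, pyRange_mul_pos Q s hs1 hQ1]
    have hQr : PySem.List.pyRange 0 ((Q : Nat) : Int) 1
        = (List.range Q).map (fun k : Nat => (k : Int)) := by
      rw [PySem.List.pyRange_one]
      rw [show (((Q : Nat) : Int) - 0).toNat = Q by omega]
      simp only [zero_add]
    have hsr : PySem.List.pyRange 0 (s : Int) 1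
        = (List.range s).map (fun k : Nat => (k : Int)) := by
      rw [PySem.List.pyRange_one]
      rw [show ((s : Int) - 0).toNat = s by omega]
      simp only [zero_add]
    rw [hQr, hsr, List.map_map, List.map_map]
    apply List.map_congr_left
    intro g hg
    have hgQ : g < Q := List.mem_range.mp hg
    simp only [Function.comp]
    -- left: the slice of the extended buffer is a full chunk
    have hc1 : ((s : Int)) * ((g : Nat) : Int) = ((s * g : Nat) : Int) := by push_cast; ring
    have hc2 : ((s * g : Nat) : Int) + (s : Int) = ((s * g : Nat) : Int) + ((s : Nat) : Int) := by
      norm_num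
    have hbound : s * g + s ≤ Q * s := by
      have h4 := Nat.mul_le_mul_left s (show g + 1 ≤ Q by omega)
      rw [Nat.mul_succ] at h4
      omega
    rw [hc1, hc2, PySem.List.slice_natCast_add]
    rw [chunk_eq_map (R.take (Q * s)) items items.length s (s * g) rfl (by omega) hEper
      (by simp only [List.length_take]; omega)]
    -- right: evaluate the modular index
    rw [List.map_map]
    apply List.map_congr_left
    intro j hj
    simp only [Function.comp]
    have hc3 : ((g : Nat) : Int) * (s : Int) + ((j : Nat) : Int) = ((g * s + j : Nat) : Int) := by
      push_cast; ring
    rw [hc3, PySem.Int.mod_natCast, PySem.List.pyGetD_natCast]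
    rw [Nat.mul_comm s g]

theorem group_sub_items_changed : Claim_changed_group_sub_items := by
  unfold Claim_changed_group_sub_items
  refine ⟨by decide, by decide, by decide, ?_, by decide, by decide⟩
  show group_sub_items [5] (-1) = []
  have hx : ∀ t : Int, t ≤ 1 → pvExtend [5] [5] t = [5] := by
    intro t ht
    rw [pvExtend, dif_neg]
    intro h
    have := h.1
    simp only [List.length_cons, List.length_nil] at this
    omega
  simp only [group_sub_items, if_neg (by decide : ¬([5] : List Int) = [])]
  rw [hx _ (by decide)]
  decide

theorem group_sub_items_tight : Claim_exact_group_sub_items := by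
  intro items gs _ _ hd
  obtain ⟨hneg, hemp, htail⟩ := hd
  have hlen : items.length = 1 := by
    match items, hemp with
    | [x], _ => rfl
    | x :: y :: rest, _ => simp only [List.tail_cons] at htail; exact absurd htail (List.cons_ne_nil y rest)
  simp only [group_sub_items, group_sub_items_alt, if_neg hemp]
  rw [pyRange_zero_nonneg_neg _ _ hneg (Int.natCast_nonneg _)]
  have hq : PySem.Int.floordiv ((items.length : Int) + gs - 1) gs = 1 := by
    rw [hlen]
    have h1 : ((1 : Nat) : Int) + gs - 1 = gs := by push_cast; ring
    rw [h1, ← PySem.Int.floordiv_neg_neg, PySem.Int.floordiv_eq_iff_of_pos (by omega)]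
    constructor <;> omega
  rw [hq]
  have h1 : PySem.List.pyRange 0 1 1 = [0] := by decide
  have h2 : PySem.List.pyRange 0 gs 1 = [] := PySem.List.pyRange_one_eq_nil (by omega)
  rw [h1, h2]
  simp
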